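-- pv_equiv track=rewrite | github.com/mwootten/snn-seizure-prediction | preprocessing/reading-data/extract-true-negatives.py | alternates
-- ===== SOURCE A (Python) =====
-- def alternates(starts, ends):
--     '''
--     Verifies that the EEG starts and ends do alternate ---
--     there are no overlapping seizure events. This should be true, but this
--     check should save some debugging if it's ever false.
--     '''
--     taggedStarts = [(t, 'start') for t in starts]
--     taggedEnds = [(t, 'end') for t in ends]
--     allTagged = sorted(taggedStarts + taggedEnds)
--     correctState = 'start'
--     for (t, state) in allTagged:
--         if state != correctState:
--             return False
--         if correctState == 'start':
--             correctState = 'end'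
--         else:
--             correctState = 'start'
--     return (correctState == 'start')
-- ===== SOURCE B (Python) =====
-- def alternates(starts, ends):
--     '''
--     Verifies that the EEG starts and ends do alternate ---
--     there are no overlapping seizure events.
--     '''
--     if len(starts) != len(ends):
--         return False
--     s = sorted(starts)
--     e = sorted(ends)
--     return all(a < b for a, b in zip(s, e)) and all(b <= a for b, a in zip(e, s[1:]))
-- ===== Notes on version B (the rewrite author's own statement) =====
-- stated objective: alternative
-- what changed: A tags every timestamp, sorts the combined tagged list of tuples and runs a start/end state machine over it; B sorts starts and ends independently and checks the pairwise conditions s[i] < e[i] and e[i] <= s[i+1] on the two sorted lists.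
import Mathlib
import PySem

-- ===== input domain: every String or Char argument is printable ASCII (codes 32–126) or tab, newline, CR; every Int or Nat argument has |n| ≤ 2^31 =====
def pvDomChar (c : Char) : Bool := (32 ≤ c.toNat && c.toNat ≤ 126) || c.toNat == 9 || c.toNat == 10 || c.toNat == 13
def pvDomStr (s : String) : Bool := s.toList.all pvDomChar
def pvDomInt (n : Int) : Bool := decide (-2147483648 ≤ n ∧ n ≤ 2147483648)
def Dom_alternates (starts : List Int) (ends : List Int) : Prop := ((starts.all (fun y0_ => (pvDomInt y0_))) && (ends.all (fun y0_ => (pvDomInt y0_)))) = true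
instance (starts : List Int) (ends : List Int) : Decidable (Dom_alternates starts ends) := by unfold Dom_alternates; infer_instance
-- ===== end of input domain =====

-- B replaces A's sort-the-tagged-union state machine by two independent sorts of
-- starts and ends plus pairwise comparisons (s[i] < e[i], e[i] <= s[i+1]): a
-- different decomposition of the same alternation check.

-- ===== PORT A =====
-- A's for-loop with early 'return False' is the usual Option-state fold: none = returned False.
def altStep (st : Option String) (p : Int × String) : Option String :=
  match st with
  | none => none
  | some correctState =>
    if p.2 ≠ correctState then none
    else if correctState = "start" then some "end" else some "start"

def alternates (starts : List Int) (ends : List Int) : Bool :=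
  let taggedStarts := starts.map (fun t => (t, "start"))
  let taggedEnds := ends.map (fun t => (t, "end"))
  let allTagged := PySem.List.sorted2 (taggedStarts ++ taggedEnds) Prod.fst Prod.snd false
  match allTagged.foldl altStep (some "start") with
  | none => false
  | some correctState => correctState == "start"

-- ===== PORT B =====
def alternates_alt (starts : List Int) (ends : List Int) : Bool :=
  if starts.length ≠ ends.length then false
  else
    let s := PySem.List.sorted starts (fun x => x) false
    let e := PySem.List.sorted ends (fun x => x) false
    (s.zip e).all (fun p => decide (p.1 < p.2)) &&
      (e.zip (PySem.List.slice s (some 1) none)).all (fun p => decide (p.1 ≤ p.2))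

-- ===== PRECONDITION & SPEC =====
def Spec_alternates (starts : List Int) (ends : List Int) (out : Bool) : Prop := out = alternates_alt starts ends
instance (starts : List Int) (ends : List Int) (out : Bool) : Decidable (Spec_alternates starts ends out) := by unfold Spec_alternates; infer_instance

-- ===== CLAIM (what is proved, stated in full; the proofs are below) =====
def Claim_equal_alternates : Prop := ∀ (starts : List Int) (ends : List Int), Dom_alternates starts ends → Spec_alternates starts ends (alternates starts ends)

-- ===== LEMMAS AND PROOFS =====

-- Injective integer key realising Python's lexicographic order on (t, 'start'/'end') pairs:
-- an 'end' at time t sorts as 2t, a 'start' at time t as 2t+1 (so 'end' before 'start' at equal t).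
def pvKey (p : Int × String) : Int := 2 * p.1 + (if p.2 = "start" then 1 else 0)

-- interleaving [s0,e0,s1,e1,...] as tagged pairs
def pvIlv : List Int → List Int → List (Int × String)
  | a :: as, b :: bs => (a, "start") :: (b, "end") :: pvIlv as bs
  | _, _ => []

-- the pairwise condition B checks, as a structural predicate
def pvGood : List Int → List Int → Prop
  | a :: as, b :: bs =>
      a < b ∧ (match as with | [] => True | a2 :: _ => b ≤ a2) ∧ pvGood as bs
  | [], [] => True
  | _, _ => False

lemma pv_lex_eq_key (p q : Int × String)
    (hp : p.2 = "start" ∨ p.2 = "end") (hq : q.2 = "start" ∨ q.2 = "end") :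
    (decide (p.1 < q.1) || (!decide (q.1 < p.1) && decide (p.2 < q.2)))
      = decide (pvKey p < pvKey q) := by
  have hse : ¬ (['s','t','a','r','t'] : List Char) < ['e','n','d'] := by decide
  have hes : (['e','n','d'] : List Char) < ['s','t','a','r','t'] := by decide
  obtain ⟨x, s⟩ := p
  obtain ⟨y, t⟩ := q
  simp only at hp hq
  rcases hp with rfl | rfl <;> rcases hq with rfl | rfl
  · rw [Bool.eq_iff_iff]; simp [pvKey]
  · rw [Bool.eq_iff_iff]; simp [pvKey, hse]; omega
  · rw [Bool.eq_iff_iff]; simp [pvKey, hes]; omega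
  · rw [Bool.eq_iff_iff]; simp [pvKey]

lemma pv_insertBy_congr {α : Type} (b1 b2 : α → α → Bool) (x : α) (ys : List α)
    (h : ∀ y ∈ ys, b1 x y = b2 x y) :
    PySem.List.insertBy b1 x ys = PySem.List.insertBy b2 x ys := by
  induction ys with
  | nil => rfl
  | cons y ys ih =>
    have hy := h y (by simp)
    simp only [PySem.List.insertBy, hy]
    split
    · rfl
    · simp only [List.cons.injEq, true_and]
      exact ih (fun z hz => h z (by simp [hz]))

lemma pv_foldl_insertBy_congr {α : Type} (b1 b2 : α → α → Bool) :
    ∀ (l acc : List α), (∀ x y, x ∈ l → (y ∈ l ∨ y ∈ acc) → b1 x y = b2 x y) →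
      l.foldl (fun acc x => PySem.List.insertBy b1 x acc) acc
        = l.foldl (fun acc x => PySem.List.insertBy b2 x acc) acc
  | [], acc, _ => rfl
  | x :: l, acc, h => by
    simp only [List.foldl_cons]
    rw [pv_insertBy_congr b1 b2 x acc (fun y hy => h x y (by simp) (Or.inr hy))]
    exact pv_foldl_insertBy_congr b1 b2 l _ (fun a c ha hc => by
      refine h a c (by simp [ha]) ?_
      rcases hc with hc | hc
      · exact Or.inl (by simp [hc])
      · rw [PySem.List.mem_insertBy] at hc
        rcases hc with rfl | hc
        · exact Or.inl (by simp)
        · exact Or.inr hc)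

-- A's Python sort of the tagged union equals a single-key sort by pvKey.
lemma pv_sorted2_eq_sorted_key (starts ends : List Int) :
    PySem.List.sorted2 (starts.map (fun t => (t, "start")) ++ ends.map (fun t => (t, "end")))
        Prod.fst Prod.snd false
      = PySem.List.sorted (starts.map (fun t => (t, "start")) ++ ends.map (fun t => (t, "end")))
        pvKey false := by
  rw [PySem.List.sorted_eq_foldl_insertBy]
  show List.foldl _ [] _ = _
  refine pv_foldl_insertBy_congr _ _ _ [] (fun p q hp hq => ?_)
  have tag : ∀ r : Int × String,
      r ∈ starts.map (fun t => (t, "start")) ++ ends.map (fun t => (t, "end")) →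
      r.2 = "start" ∨ r.2 = "end" := by
    intro r hr
    rcases List.mem_append.mp hr with h | h <;> rcases List.mem_map.mp h with ⟨t, _, rfl⟩ <;> simp
  rcases hq with hq | hq
  · exact pv_lex_eq_key p q (tag p hp) (tag q hq)
  · exact absurd hq (by simp)

lemma pv_foldl_altStep_none : ∀ l : List (Int × String), l.foldl altStep none = none := by
  intro l
  induction l with
  | nil => rfl
  | cons p l ih => simpa [altStep] using ih

lemma pv_run_ilv : ∀ a b : List Int, a.length = b.length →
    (pvIlv a b).foldl altStep (some "start") = some "start" := by
  intro a
  induction a with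
  | nil => intro b hb; cases b with
    | nil => rfl
    | cons y bs => simp at hb
  | cons x as ih =>
    intro b hb
    cases b with
    | nil => simp at hb
    | cons y bs =>
      simp only [pvIlv, List.foldl_cons]
      have h1 : altStep (some "start") (x, "start") = some "end" := by simp [altStep]
      have h2 : altStep (some "end") (y, "end") = some "start" := by simp [altStep]
      rw [h1, h2]
      exact ih bs (by simpa using hb)

lemma pv_run_shape : ∀ (n : Nat) (L : List (Int × String)), L.length ≤ n →
    L.foldl altStep (some "start") = some "start" →
    ∃ a b : List Int, a.length = b.length ∧ L = pvIlv a b := by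
  intro n
  induction n with
  | zero =>
    intro L hL _
    have : L = [] := List.eq_nil_of_length_eq_zero (Nat.le_zero.mp hL)
    exact ⟨[], [], rfl, by simp [this, pvIlv]⟩
  | succ n ih =>
    intro L hL hrun
    cases L with
    | nil => exact ⟨[], [], rfl, by simp [pvIlv]⟩
    | cons p L' =>
      by_cases hp : p.2 = "start"
      · cases L' with
        | nil =>
          exfalso
          simp [altStep, hp] at hrun
        | cons q L'' =>
          by_cases hq : q.2 = "end"
          · have h1 : altStep (some "start") p = some "end" := by simp [altStep, hp]
            have h2 : altStep (some "end") q = some "start" := by simp [altStep, hq]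
            simp only [List.foldl_cons, h1, h2] at hrun
            obtain ⟨a, b, hab, hL''⟩ := ih L'' (by simp at hL; omega) hrun
            refine ⟨p.1 :: a, q.1 :: b, by simp [hab], ?_⟩
            simp only [pvIlv, ← hL'']
            rw [← hp, ← hq]
          · exfalso
            have h1 : altStep (some "start") p = some "end" := by simp [altStep, hp]
            have h2 : altStep (some "end") q = none := by simp [altStep, hq]
            simp only [List.foldl_cons, h1, h2, pv_foldl_altStep_none] at hrun
            exact absurd hrun (by simp)
      · exfalso
        have h1 : altStep (some "start") p = none := by simp [altStep, hp]
        simp only [List.foldl_cons, h1, pv_foldl_altStep_none] at hrun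
        exact absurd hrun (by simp)

lemma pv_ilv_perm : ∀ a b : List Int, a.length = b.length →
    (pvIlv a b).Perm (a.map (fun t => (t, "start")) ++ b.map (fun t => (t, "end"))) := by
  intro a
  induction a with
  | nil => intro b hb; cases b with
    | nil => simp [pvIlv]
    | cons y bs => simp at hb
  | cons x as ih =>
    intro b hb
    cases b with
    | nil => simp at hb
    | cons y bs =>
      simp only [pvIlv, List.map_cons, List.cons_append]
      refine List.Perm.cons _ ?_
      have := (ih bs (by simpa using hb)).cons (y, "end")
      exact this.trans List.perm_middle.symm

lemma pv_ilv_filter_start : ∀ a b : List Int, a.length = b.length →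
    (pvIlv a b).filter (fun p => p.2 == "start") = a.map (fun t => (t, "start")) := by
  intro a
  induction a with
  | nil => intro b hb; cases b with
    | nil => rfl
    | cons y bs => simp at hb
  | cons x as ih =>
    intro b hb
    cases b with
    | nil => simp at hb
    | cons y bs => simp [pvIlv, List.filter, ih bs (by simpa using hb)]

lemma pv_ilv_filter_end : ∀ a b : List Int, a.length = b.length →
    (pvIlv a b).filter (fun p => p.2 == "end") = b.map (fun t => (t, "end")) := by
  intro a
  induction a with
  | nil => intro b hb; cases b with
    | nil => rfl
    | cons y bs => simp at hb
  | cons x as ih =>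
    intro b hb
    cases b with
    | nil => simp at hb
    | cons y bs => simp [pvIlv, List.filter, ih bs (by simpa using hb)]

-- extraction: if pvIlv a b is a permutation of the tagged union, a ~ starts and b ~ ends
lemma pv_extract (starts ends a b : List Int) (hab : a.length = b.length)
    (hperm : (pvIlv a b).Perm
      (starts.map (fun t => (t, "start")) ++ ends.map (fun t => (t, "end")))) :
    a.Perm starts ∧ b.Perm ends := by
  constructor
  · have hf := hperm.filter (fun p => p.2 == "start")
    rw [pv_ilv_filter_start a b hab] at hf
    rw [List.filter_append] at hf
    have h1 : (starts.map (fun t => (t, "start"))).filter (fun p => p.2 == "start")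
        = starts.map (fun t => (t, "start")) := by
      rw [List.filter_eq_self]; intro p hp; rcases List.mem_map.mp hp with ⟨t, _, rfl⟩; simp
    have h2 : (ends.map (fun t => (t, "end"))).filter (fun p => p.2 == "start") = [] := by
      rw [List.filter_eq_nil_iff]; intro p hp; rcases List.mem_map.mp hp with ⟨t, _, rfl⟩; simp
    rw [h1, h2, List.append_nil] at hf
    have h3 := hf.map Prod.fst
    rw [List.map_map, List.map_map] at h3
    rw [show (Prod.fst ∘ fun t : Int => (t, "start")) = id from rfl] at h3
    rw [List.map_id, List.map_id] at h3
    exact h3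
  · have hf := hperm.filter (fun p => p.2 == "end")
    rw [pv_ilv_filter_end a b hab] at hf
    rw [List.filter_append] at hf
    have h1 : (starts.map (fun t => (t, "start"))).filter (fun p => p.2 == "end") = [] := by
      rw [List.filter_eq_nil_iff]; intro p hp; rcases List.mem_map.mp hp with ⟨t, _, rfl⟩; simp
    have h2 : (ends.map (fun t => (t, "end"))).filter (fun p => p.2 == "end")
        = ends.map (fun t => (t, "end")) := by
      rw [List.filter_eq_self]; intro p hp; rcases List.mem_map.mp hp with ⟨t, _, rfl⟩; simp
    rw [h1, h2, List.nil_append] at hf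
    have h3 := hf.map Prod.fst
    rw [List.map_map, List.map_map] at h3
    rw [show (Prod.fst ∘ fun t : Int => (t, "end")) = id from rfl] at h3
    rw [List.map_id, List.map_id] at h3
    exact h3

lemma pv_good_to_chain_lt : ∀ a b : List Int, a.length = b.length → pvGood a b →
    List.IsChain (fun p q => pvKey p < pvKey q) (pvIlv a b) := by
  intro a
  induction a with
  | nil => intro b hb _; cases b with
    | nil => exact List.isChain_nil
    | cons y bs => simp at hb
  | cons x as ih =>
    intro b hb hg
    cases b with
    | nil => simp at hb
    | cons y bs =>
      obtain ⟨hxy, hmid, hrest⟩ := hg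
      have hkey1 : pvKey (x, "start") < pvKey (y, "end") := by simp [pvKey]; omega
      cases as with
      | nil =>
        cases bs with
        | nil =>
          simp only [pvIlv]
          exact List.isChain_cons_cons.mpr ⟨hkey1, List.isChain_singleton _⟩
        | cons b2 bs' => simp at hb
      | cons a2 as' =>
        cases bs with
        | nil => simp at hb
        | cons b2 bs' =>
          have hchain := ih (b2 :: bs') (by simpa using hb) hrest
          have hmid' : y ≤ a2 := hmid
          have hkey2 : pvKey (y, "end") < pvKey (a2, "start") := by
            simp [pvKey]; omega
          simp only [pvIlv] at hchain ⊢
          exact List.isChain_cons_cons.mpr ⟨hkey1,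
            List.isChain_cons_cons.mpr ⟨hkey2, hchain⟩⟩

lemma pv_chain_le_to_good : ∀ a b : List Int, a.length = b.length →
    List.IsChain (fun p q => pvKey p ≤ pvKey q) (pvIlv a b) → pvGood a b := by
  intro a
  induction a with
  | nil => intro b hb _; cases b with
    | nil => trivial
    | cons y bs => simp at hb
  | cons x as ih =>
    intro b hb hchain
    cases b with
    | nil => simp at hb
    | cons y bs =>
      simp only [pvIlv] at hchain
      have h1 := (List.isChain_cons_cons.mp hchain).1
      have hchain2 := (List.isChain_cons_cons.mp hchain).2
      have hxy : x < y := by simp [pvKey] at h1; omega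
      cases as with
      | nil =>
        cases bs with
        | nil => exact ⟨hxy, trivial, trivial⟩
        | cons b2 bs' => simp at hb
      | cons a2 as' =>
        cases bs with
        | nil => simp at hb
        | cons b2 bs' =>
          simp only [pvIlv] at hchain2
          obtain ⟨h2, hrest0⟩ := List.isChain_cons_cons.mp hchain2
          have hrest : List.IsChain (fun p q => pvKey p ≤ pvKey q) (pvIlv (a2 :: as') (b2 :: bs')) := by
            simp only [pvIlv]; exact hrest0
          refine ⟨hxy, ?_, ih (b2 :: bs') (by simpa using hb) hrest⟩
          show y ≤ a2
          simp [pvKey] at h2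
          omega

lemma pv_good_chain_s : ∀ a b : List Int, a.length = b.length → pvGood a b →
    List.IsChain (fun u v : Int => u < v) a := by
  intro a
  induction a with
  | nil => intro b _ _; exact List.isChain_nil
  | cons x as ih =>
    intro b hb hg
    cases b with
    | nil => simp at hb
    | cons y bs =>
      obtain ⟨hxy, hmid, hrest⟩ := hg
      cases as with
      | nil => exact List.isChain_singleton _
      | cons a2 as' =>
        cases bs with
        | nil => simp at hb
        | cons b2 bs' =>
          have hmid' : y ≤ a2 := hmid
          have := ih (b2 :: bs') (by simpa using hb) hrest
          exact List.isChain_cons_cons.mpr ⟨by omega, this⟩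

lemma pv_good_chain_e : ∀ a b : List Int, a.length = b.length → pvGood a b →
    List.IsChain (fun u v : Int => u < v) b := by
  intro a
  induction a with
  | nil => intro b hb _; cases b with
    | nil => exact List.isChain_nil
    | cons y bs => simp at hb
  | cons x as ih =>
    intro b hb hg
    cases b with
    | nil => simp at hb
    | cons y bs =>
      obtain ⟨hxy, hmid, hrest⟩ := hg
      cases as with
      | nil =>
        cases bs with
        | nil => exact List.isChain_singleton _
        | cons b2 bs' => simp at hb
      | cons a2 as' =>
        cases bs with
        | nil => simp at hb
        | cons b2 bs' =>
          have hmid' : y ≤ a2 := hmid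
          have hb2 := ih (b2 :: bs') (by simpa using hb) hrest
          have ha2b2 : a2 < b2 := hrest.1
          exact List.isChain_cons_cons.mpr ⟨by omega, hb2⟩

lemma pv_chain_lt_pairwise {α : Type} (key : α → Int) (l : List α)
    (h : List.IsChain (fun p q => key p < key q) l) :
    List.Pairwise (fun p q => key p < key q) l :=
  (@List.isChain_iff_pairwise α (fun p q => key p < key q) l ⟨fun h1 h2 => lt_trans h1 h2⟩).mp h

lemma pv_allB_iff : ∀ a b : List Int, a.length = b.length →
    (((a.zip b).all (fun p => decide (p.1 < p.2)) &&
        (b.zip a.tail).all (fun p => decide (p.1 ≤ p.2))) = true ↔ pvGood a b) := by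
  intro a
  induction a with
  | nil => intro b hb; cases b with
    | nil => simp [pvGood]
    | cons y bs => simp at hb
  | cons x as ih =>
    intro b hb
    cases b with
    | nil => simp at hb
    | cons y bs =>
      cases as with
      | nil =>
        cases bs with
        | nil => simp [pvGood]
        | cons b2 bs' => simp at hb
      | cons a2 as' =>
        cases bs with
        | nil => simp at hb
        | cons b2 bs' =>
          have hIH := ih (b2 :: bs') (by simpa using hb)
          simp only [List.zip_cons_cons, List.all_cons, List.tail_cons] at hIH ⊢
          simp only [Bool.and_eq_true, decide_eq_true_eq] at hIH ⊢
          show _ ↔ x < y ∧ y ≤ a2 ∧ pvGood (a2 :: as') (b2 :: bs')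
          rw [← hIH]
          tauto

-- characterization of A
lemma pv_altA_iff (starts ends : List Int) :
    alternates starts ends = true ↔
      starts.length = ends.length ∧
        pvGood (PySem.List.sorted starts (fun x => x) false)
               (PySem.List.sorted ends (fun x => x) false) := by
  unfold alternates
  simp only [pv_sorted2_eq_sorted_key]
  set M := starts.map (fun t => (t, "start")) ++ ends.map (fun t => (t, "end")) with hM
  set L := PySem.List.sorted M pvKey false with hL
  have hA : (match L.foldl altStep (some "start") with
      | none => false
      | some correctState => correctState == "start") = true
      ↔ L.foldl altStep (some "start") = some "start" := by
    rcases h : L.foldl altStep (some "start") with _ | c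
    · simp
    · simp [beq_iff_eq]
  rw [hA]
  constructor
  · intro hrun
    obtain ⟨a, b, hab, hLab⟩ := pv_run_shape L.length L (le_refl _) hrun
    have hperm : (pvIlv a b).Perm M := by rw [← hLab]; exact PySem.List.sorted_perm M pvKey false
    obtain ⟨has, hbs⟩ := pv_extract starts ends a b hab hperm
    have hlen : starts.length = ends.length := by
      rw [← has.length_eq, ← hbs.length_eq]; exact hab
    have hpw : List.Pairwise (fun p q => pvKey p ≤ pvKey q) (pvIlv a b) := by
      rw [← hLab]; exact PySem.List.sorted_pairwise M pvKey
    have hchain : List.IsChain (fun p q => pvKey p ≤ pvKey q) (pvIlv a b) :=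
      (@List.isChain_iff_pairwise (Int × String) (fun p q => pvKey p ≤ pvKey q) (pvIlv a b)
        ⟨fun h1 h2 => le_trans h1 h2⟩).mpr hpw
    have hgood : pvGood a b := pv_chain_le_to_good a b hab hchain
    have hsa : PySem.List.sorted starts (fun x => x) false = a :=
      PySem.List.sorted_eq_of_perm_of_pairwise_lt starts a (fun x => x) has
        (by simpa using pv_chain_lt_pairwise (fun x => x) a (pv_good_chain_s a b hab hgood))
    have hsb : PySem.List.sorted ends (fun x => x) false = b :=
      PySem.List.sorted_eq_of_perm_of_pairwise_lt ends b (fun x => x) hbs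
        (by simpa using pv_chain_lt_pairwise (fun x => x) b (pv_good_chain_e a b hab hgood))
    rw [hsa, hsb]
    exact ⟨hlen, hgood⟩
  · intro ⟨hlen, hgood⟩
    set s := PySem.List.sorted starts (fun x => x) false with hs
    set e := PySem.List.sorted ends (fun x => x) false with he
    have hsl : s.length = e.length := by
      rw [hs, he, PySem.List.length_sorted, PySem.List.length_sorted]; exact hlen
    have hLeq : L = pvIlv s e := by
      refine PySem.List.sorted_eq_of_perm_of_pairwise_lt M (pvIlv s e) pvKey ?_ ?_
      · refine (pv_ilv_perm s e hsl).trans ?_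
        exact List.Perm.append
          ((PySem.List.sorted_perm starts (fun x => x) false).map _)
          ((PySem.List.sorted_perm ends (fun x => x) false).map _)
      · exact pv_chain_lt_pairwise pvKey _ (pv_good_to_chain_lt s e hsl hgood)
    rw [hLeq]
    exact pv_run_ilv s e hsl

-- characterization of B
lemma pv_altB_iff (starts ends : List Int) :
    alternates_alt starts ends = true ↔
      starts.length = ends.length ∧
        pvGood (PySem.List.sorted starts (fun x => x) false)
               (PySem.List.sorted ends (fun x => x) false) := by
  unfold alternates_alt
  by_cases hlen : starts.length = ends.length
  · simp only [hlen, ne_eq, not_true_eq_false, if_false]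
    rw [PySem.List.slice_from_one]
    have hsl : (PySem.List.sorted starts (fun x => x) false).length
        = (PySem.List.sorted ends (fun x => x) false).length := by
      rw [PySem.List.length_sorted, PySem.List.length_sorted]; exact hlen
    rw [pv_allB_iff _ _ hsl]
    simp
  · simp [hlen]

-- ===== VERDICT (by name: the statement is the Claim_ definition above) =====
theorem alternates_spec : Claim_equal_alternates := by
  unfold Claim_equal_alternates
  intro starts ends _
  unfold Spec_alternates
  have hA := pv_altA_iff starts ends
  have hB := pv_altB_iff starts ends
  cases hA' : alternates starts ends <;> cases hB' : alternates_alt starts ends <;>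
    simp_all
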